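-- pv_equiv track=rewrite | github.com/faonon-sys/CEM | backend/services/export_formatter.py | _group_by_priority
-- ===== SOURCE A (Python) =====
-- from typing import Dict, Any, List
--
-- def _group_by_priority(
--
--     assumptions: List[Dict[str, Any]]
-- ) -> Dict[str, List[Dict[str, Any]]]:
--     """Group assumptions by priority tier."""
--     groups = {
--         "high": [],
--         "needs_review": [],
--         "medium": [],
--         "low": []
--     }
--
--     for assumption in assumptions:
--         priority = assumption.get("priority_tier", "low")
--         if priority in groups:
--             groups[priority].append(assumption)
--
--     return groups
-- ===== SOURCE B (Python) =====
-- def _group_by_priority(assumptions):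
--     """Group assumptions by priority tier (one filtering pass per tier)."""
--     tiers = ["high", "needs_review", "medium", "low"]
--     return {t: [a for a in assumptions if a.get("priority_tier", "low") == t]
--             for t in tiers}
-- ===== Notes on version B (the rewrite author's own statement) =====
-- stated objective: alternative
-- what changed: Replaces A's single dispatch loop that appends into a mutable four-bucket dict with a dict comprehension doing one filtering pass over the assumptions per tier.
import Mathlib
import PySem

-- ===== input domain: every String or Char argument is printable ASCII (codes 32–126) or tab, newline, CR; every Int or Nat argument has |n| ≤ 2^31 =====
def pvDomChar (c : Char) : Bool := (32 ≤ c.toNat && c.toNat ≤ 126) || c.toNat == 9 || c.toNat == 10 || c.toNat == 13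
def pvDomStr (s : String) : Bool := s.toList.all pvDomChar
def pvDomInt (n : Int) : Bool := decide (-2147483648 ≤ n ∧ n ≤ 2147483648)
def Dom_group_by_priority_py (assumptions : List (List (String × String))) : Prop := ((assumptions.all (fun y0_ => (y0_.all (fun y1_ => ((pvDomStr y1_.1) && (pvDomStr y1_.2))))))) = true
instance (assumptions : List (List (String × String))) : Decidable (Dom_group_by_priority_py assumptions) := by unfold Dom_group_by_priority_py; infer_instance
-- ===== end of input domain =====

-- B groups by four per-tier filtering passes instead of A's single dict-dispatch loop (objective: alternative decomposition, same cost).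

-- ===== PORT A =====
-- A's loop body: dispatch one assumption into groups[priority] if the tier is a known key.
def pvStepA (groups : PySem.Dict String (List (List (String × String))))
    (assumption : List (String × String)) : PySem.Dict String (List (List (String × String))) :=
  let priority := (PySem.Dict.mk assumption).getD "priority_tier" "low"
  if groups.contains priority then
    groups.modify priority [] (fun xs => xs ++ [assumption])
  else groups

def group_by_priority_py (assumptions : List (List (String × String))) : List (String × List (List (String × String))) :=
  let init : PySem.Dict String (List (List (String × String))) :=
    PySem.Dict.ofList [("high", []), ("needs_review", []), ("medium", []), ("low", [])]
  (assumptions.foldl pvStepA init).items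

-- ===== PORT B =====
-- B: for each of the four tiers in order, one filtering pass over assumptions.
def group_by_priority_py_alt (assumptions : List (List (String × String))) : List (String × List (List (String × String))) :=
  ["high", "needs_review", "medium", "low"].map
    (fun t => (t, assumptions.filter (fun a => ((a.lookup "priority_tier").getD "low") == t)))

-- ===== PRECONDITION & SPEC =====
def Spec_group_by_priority_py (assumptions : List (List (String × String))) (out : List (String × List (List (String × String)))) : Prop := out = group_by_priority_py_alt assumptions
instance (assumptions : List (List (String × String))) (out : List (String × List (List (String × String)))) : Decidable (Spec_group_by_priority_py assumptions out) := by unfold Spec_group_by_priority_py; infer_instance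

-- ===== CLAIM (what is proved, stated in full; the proofs are below) =====
def Claim_equal_group_by_priority_py : Prop := ∀ (assumptions : List (List (String × String))), Dom_group_by_priority_py assumptions → Spec_group_by_priority_py assumptions (group_by_priority_py assumptions)

-- ===== LEMMAS AND PROOFS =====

-- A reads the tier via Dict.getD on the dict built from the assoc list, B via List.lookup: both are first-match.
theorem tier_bridge (a : List (String × String)) :
    (PySem.Dict.mk a).getD "priority_tier" "low" = ((a.lookup "priority_tier").getD "low") := by
  induction a with
  | nil => rfl
  | cons p rest ih =>
    cases p with
    | mk k v =>
      by_cases hk : k = "priority_tier"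
      · subst hk
        simp [List.lookup, PySem.Dict.getD_eq_get?_getD, PySem.Dict.get?_mk_cons]
      · have h1 : (k == "priority_tier") = false := beq_eq_false_iff_ne.mpr hk
        have h2 : ("priority_tier" == k) = false := beq_eq_false_iff_ne.mpr (Ne.symm hk)
        simp only [List.lookup, h2, PySem.Dict.getD_eq_get?_getD, PySem.Dict.get?_mk_cons, h1,
          Bool.false_eq_true, if_false]
        simpa [PySem.Dict.getD_eq_get?_getD] using ih

-- one step of A's loop on the four-bucket dict, expressed through B's tier reading
theorem stepA_eq (x : List (String × String)) (h nr m l : List (List (String × String))) :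
    pvStepA (PySem.Dict.mk [("high", h), ("needs_review", nr), ("medium", m), ("low", l)]) x
    = PySem.Dict.mk
        [("high", if ((x.lookup "priority_tier").getD "low") = "high" then h ++ [x] else h),
         ("needs_review", if ((x.lookup "priority_tier").getD "low") = "needs_review" then nr ++ [x] else nr),
         ("medium", if ((x.lookup "priority_tier").getD "low") = "medium" then m ++ [x] else m),
         ("low", if ((x.lookup "priority_tier").getD "low") = "low" then l ++ [x] else l)] := by
  unfold pvStepA
  rw [tier_bridge]
  set p := ((x.lookup "priority_tier").getD "low") with hp
  by_cases h1 : p = "high"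
  · simp [h1, PySem.Dict.contains, PySem.Dict.modify, PySem.Dict.getD_eq_get?_getD,
      PySem.Dict.get?_mk_cons, PySem.Dict.insert]
  · by_cases h2 : p = "needs_review"
    · simp [h2, PySem.Dict.contains, PySem.Dict.modify, PySem.Dict.getD_eq_get?_getD,
        PySem.Dict.get?_mk_cons, PySem.Dict.insert]
    · by_cases h3 : p = "medium"
      · simp [h3, PySem.Dict.contains, PySem.Dict.modify, PySem.Dict.getD_eq_get?_getD,
          PySem.Dict.get?_mk_cons, PySem.Dict.insert]
      · by_cases h4 : p = "low"
        · simp [h4, PySem.Dict.contains, PySem.Dict.modify, PySem.Dict.getD_eq_get?_getD,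
            PySem.Dict.get?_mk_cons, PySem.Dict.insert]
        · simp [PySem.Dict.contains_mk, h1, h2, h3, h4,
            Ne.symm h1, Ne.symm h2, Ne.symm h3, Ne.symm h4]

theorem loop_invariant (xs : List (List (String × String)))
    (h nr m l : List (List (String × String))) :
    xs.foldl pvStepA (PySem.Dict.mk [("high", h), ("needs_review", nr), ("medium", m), ("low", l)])
    = PySem.Dict.mk
        [("high", h ++ xs.filter (fun a => ((a.lookup "priority_tier").getD "low") == "high")),
         ("needs_review", nr ++ xs.filter (fun a => ((a.lookup "priority_tier").getD "low") == "needs_review")),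
         ("medium", m ++ xs.filter (fun a => ((a.lookup "priority_tier").getD "low") == "medium")),
         ("low", l ++ xs.filter (fun a => ((a.lookup "priority_tier").getD "low") == "low"))] := by
  induction xs generalizing h nr m l with
  | nil => simp
  | cons x rest ih =>
    rw [List.foldl_cons, stepA_eq, ih]
    simp only [List.filter_cons, beq_iff_eq, PySem.Dict.mk.injEq]
    split_ifs <;> simp_all

-- ===== VERDICT (by name: the statement is the Claim_ definition above) =====
theorem group_by_priority_py_spec : Claim_equal_group_by_priority_py := by
  intro assumptions _
  show (assumptions.foldl pvStepA (PySem.Dict.ofList [("high", []), ("needs_review", []), ("medium", []), ("low", [])])).items = group_by_priority_py_alt assumptions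
  have hinit : (PySem.Dict.ofList [("high", ([] : List (List (String × String)))), ("needs_review", []), ("medium", []), ("low", [])])
      = PySem.Dict.mk [("high", []), ("needs_review", []), ("medium", []), ("low", [])] := by decide
  rw [hinit, loop_invariant]
  simp [group_by_priority_py_alt, List.map]
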